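-- pv_equiv track=rewrite | github.com/Emanuel-de-Jong/Saxion-Wildlife-Classifier | postprocessing/app/scripts/postprocessing/postprocess.py | __get_items_to_keep
-- ===== SOURCE A (Python) =====
-- def __process_labels(label_lst):
--     if not label_lst:
--         return 'none'
--     temp_dict = {animal: label_lst.count(animal) for animal in label_lst}
--     ordered_lst = sorted(set(label_lst))
--     return '__'.join(f'{animal}_{temp_dict[animal]}' for animal in ordered_lst)
--
-- def __get_items_to_keep(batch_list):
--     '''
--     Generate a list with a list of labels, that we want to keep
--     This is done by checking if a list of labels is not a subset of
--     another list of labels. This way, we only have the unique label combinations.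
--
--     Parameters
--     ----------
--     batch_list: list
--         A list with all labels from a specific batch
--
--     Returns
--     -------
--     unique_labels: list
--         A list with a list of labels that we want to keep
--     '''
--     # Sort by length in descending order
--     indexed_lst = sorted(
--         ((index, lst) for index, lst in enumerate(batch_list)),
--         key=lambda x: len(x[1]), reverse=True
--     )
--
--     reduced_lists = []
--     for index, lst in indexed_lst:
--         if not any(set(lst).issubset(set(other)) for _, other in reduced_lists):
--             reduced_lists.append((index, lst))
--
--     # Process the labels and return the final result
--     unique_labels = [__process_labels(lst) for _, lst in reduced_lists]
--     return unique_labels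
-- ===== SOURCE B (Python) =====
-- def __process_labels(label_lst):
--     if not label_lst:
--         return 'none'
--     temp_dict = {animal: label_lst.count(animal) for animal in label_lst}
--     ordered_lst = sorted(set(label_lst))
--     return '__'.join(f'{animal}_{temp_dict[animal]}' for animal in ordered_lst)
--
-- def __get_items_to_keep(batch_list):
--     # Sort once; then a list is kept iff its set is not a subset of ANY
--     # earlier (longer-or-equal) list's set -- no greedy accumulator needed.
--     ordered = sorted(batch_list, key=len, reverse=True)
--     kept = [lst for i, lst in enumerate(ordered)
--             if not any(set(lst) <= set(prev) for prev in ordered[:i])]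
--     return [__process_labels(lst) for lst in kept]
-- ===== Notes on version B (the rewrite author's own statement) =====
-- stated objective: simpler
-- what changed: B keeps the same stable length-descending sort but replaces A's greedy accumulator (and the index pairs A carries and then discards) with a stateless comprehension that keeps a list iff its set is a subset of no earlier list's set, relying on transitivity of the subset relation for equivalence.
import Mathlib
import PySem

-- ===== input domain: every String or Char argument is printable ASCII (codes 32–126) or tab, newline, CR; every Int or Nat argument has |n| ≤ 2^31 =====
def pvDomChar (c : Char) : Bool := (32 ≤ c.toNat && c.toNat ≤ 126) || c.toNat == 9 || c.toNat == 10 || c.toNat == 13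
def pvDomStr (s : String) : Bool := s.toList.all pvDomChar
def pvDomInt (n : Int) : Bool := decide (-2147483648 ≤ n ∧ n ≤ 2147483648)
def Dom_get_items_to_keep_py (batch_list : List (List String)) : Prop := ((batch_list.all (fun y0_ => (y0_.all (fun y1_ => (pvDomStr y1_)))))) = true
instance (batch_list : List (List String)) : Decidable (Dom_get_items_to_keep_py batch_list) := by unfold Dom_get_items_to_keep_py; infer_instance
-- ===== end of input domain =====

-- B drops the greedy accumulator and the index plumbing: after the same stable sort, a list is
-- kept iff its set is a subset of NO earlier list's set (a subset test against predecessors,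
-- not against the kept list); same output, simpler decomposition, no speed claim.

-- ===== PORT A =====
-- shared helper: the subset test 'set(a) <= set(b)' both programs run on a pair of label lists
def subL (a b : List String) : Bool := PySem.Set.issubset (PySem.Set.ofList a) (PySem.Set.ofList b)

-- shared helper: __process_labels (identical in Source A and Source B)
def processLabelsPy (label_lst : List String) : String :=
  if label_lst = [] then "none"
  else
    let temp_dict : PySem.Dict String Int :=
      label_lst.foldl (fun d animal => d.insert animal ((PySem.List.count label_lst animal : Int))) PySem.Dict.empty
    let ordered_lst := PySem.List.sorted (PySem.Set.ofList label_lst) (fun x => x) false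
    PySem.Str.join "__" (ordered_lst.map (fun animal => animal ++ "_" ++ PySem.Int.toStr (temp_dict.getD animal 0)))

def get_items_to_keep_py (batch_list : List (List String)) : List String :=
  let indexed_lst := PySem.List.sorted (PySem.List.enumerate batch_list) (fun x => PySem.List.len x.2) true
  let reduced_lists := indexed_lst.foldl
    (fun acc p =>
      if acc.any (fun q => subL p.2 q.2) then acc
      else acc ++ [p]) ([] : List (Int × List String))
  reduced_lists.map (fun q => processLabelsPy q.2)

-- ===== PORT B =====
def get_items_to_keep_py_alt (batch_list : List (List String)) : List String :=
  let ordered := PySem.List.sorted batch_list (fun l => PySem.List.len l) true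
  let kept := (PySem.List.enumerate ordered).filterMap
    (fun p => if (PySem.List.slice ordered none (some p.1)).any
                  (fun prev => subL p.2 prev)
              then none else some p.2)
  kept.map processLabelsPy

-- ===== PRECONDITION & SPEC =====
def Spec_get_items_to_keep_py (batch_list : List (List String)) (out : List String) : Prop := out = get_items_to_keep_py_alt batch_list
instance (batch_list : List (List String)) (out : List String) : Decidable (Spec_get_items_to_keep_py batch_list out) := by unfold Spec_get_items_to_keep_py; infer_instance

-- ===== CLAIM (what is proved, stated in full; the proofs are below) =====
def Claim_equal_get_items_to_keep_py : Prop := ∀ (batch_list : List (List String)), Dom_get_items_to_keep_py batch_list → Spec_get_items_to_keep_py batch_list (get_items_to_keep_py batch_list)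

-- ===== LEMMAS AND PROOFS =====

theorem subL_iff (a b : List String) : subL a b = true ↔ ∀ x ∈ a, x ∈ b := by
  simp [subL, PySem.Set.issubset, PySem.Set.contains, PySem.Set.mem_ofList]

theorem subL_refl (a : List String) : subL a a = true := by
  simp [subL_iff]

theorem subL_trans {a b c : List String} (h1 : subL a b = true) (h2 : subL b c = true) :
    subL a c = true := by
  rw [subL_iff] at *
  exact fun x hx => h2 x (h1 x hx)

-- B's predecessor filter, written as a structural recursion over the sorted list
def pf (seen : List (List String)) : List (List String) → List (List String)
  | [] => []
  | x :: xs => if seen.any (fun s => subL x s) then pf (seen ++ [x]) xs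
               else x :: pf (seen ++ [x]) xs

theorem map_snd_insertBy (p : List String → List String → Bool)
    (x : Int × List String) (ys : List (Int × List String)) :
    (PySem.List.insertBy (fun a b => p a.2 b.2) x ys).map (·.2)
      = PySem.List.insertBy p x.2 (ys.map (·.2)) := by
  induction ys with
  | nil => rfl
  | cons y ys ih =>
    simp only [PySem.List.insertBy, List.map]
    by_cases h : p x.2 y.2 <;> simp [h, ih]

theorem map_snd_foldl_insertBy (p : List String → List String → Bool)
    (l : List (Int × List String)) (a : List (Int × List String)) :
    (l.foldl (fun acc x => PySem.List.insertBy (fun u v => p u.2 v.2) x acc) a).map (·.2)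
      = (l.map (·.2)).foldl (fun acc x => PySem.List.insertBy p x acc) (a.map (·.2)) := by
  induction l generalizing a with
  | nil => rfl
  | cons x l ih => simp only [List.foldl, List.map]; rw [ih, map_snd_insertBy]

-- stability: sorting the (index, list) pairs by len of the second component and dropping
-- the indices is sorting the lists themselves
theorem map_snd_sorted_enum (xs : List (List String)) :
    (PySem.List.sorted (PySem.List.enumerate xs) (fun x => PySem.List.len x.2) true).map (·.2)
      = PySem.List.sorted xs (fun l => PySem.List.len l) true := by
  rw [PySem.List.sorted_rev_eq_foldl_insertBy, PySem.List.sorted_rev_eq_foldl_insertBy,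
    map_snd_foldl_insertBy (fun u v => decide (PySem.List.len v < PySem.List.len u))]
  simp [PySem.List.map_snd_enumerate]

-- A's greedy loop over pairs computes (on the second components) the greedy loop over lists
theorem map_snd_greedy (l : List (Int × List String)) (acc : List (Int × List String)) :
    (l.foldl (fun acc p => if acc.any (fun q => subL p.2 q.2) then acc else acc ++ [p]) acc).map (·.2)
      = (l.map (·.2)).foldl (fun acc x => if acc.any (fun q => subL x q) then acc else acc ++ [x]) (acc.map (·.2)) := by
  induction l generalizing acc with
  | nil => rfl
  | cons p l ih =>
    simp only [List.foldl, List.map]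
    rw [show (acc.any fun q => subL p.2 q.2) = ((acc.map (·.2)).any fun q => subL p.2 q) by
      rw [List.any_map]; rfl]
    by_cases h : (acc.map (·.2)).any (fun q => subL p.2 q) <;> simp [h, ih]

-- the heart of the equivalence: the greedy accumulator loop equals the predecessor filter.
-- invariants: everything in acc has been seen, and every seen list is a subset of some kept one.
theorem greedy_eq_pf (l : List (List String)) (acc seen : List (List String))
    (h1 : ∀ y ∈ acc, y ∈ seen)
    (h2 : ∀ s ∈ seen, ∃ y ∈ acc, subL s y = true) :
    l.foldl (fun acc x => if acc.any (fun q => subL x q) then acc else acc ++ [x]) acc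
      = acc ++ pf seen l := by
  induction l generalizing acc seen with
  | nil => simp [pf]
  | cons x xs ih =>
    by_cases hc : acc.any (fun q => subL x q) = true
    · have hs : seen.any (fun s => subL x s) = true := by
        rw [List.any_eq_true] at hc ⊢
        obtain ⟨q, hq, hsub⟩ := hc
        exact ⟨q, h1 q hq, hsub⟩
      simp only [List.foldl, pf, hc, hs, if_true]
      exact ih acc (seen ++ [x])
        (fun y hy => List.mem_append_left _ (h1 y hy))
        (fun s hsm => by
          rcases List.mem_append.1 hsm with h | h
          · exact h2 s h
          · rw [List.any_eq_true] at hc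
            obtain ⟨q, hq, hsub⟩ := hc
            exact ⟨q, hq, by rw [List.mem_singleton.1 h]; exact hsub⟩)
    · have hs : seen.any (fun s => subL x s) = false := by
        rw [Bool.eq_false_iff]
        intro hany
        rw [List.any_eq_true] at hany
        obtain ⟨s, hsm, hxs⟩ := hany
        obtain ⟨y, hy, hsy⟩ := h2 s hsm
        exact hc (List.any_eq_true.2 ⟨y, hy, subL_trans hxs hsy⟩)
      simp only [List.foldl, pf, hc, hs, if_false, Bool.false_eq_true]
      rw [ih (acc ++ [x]) (seen ++ [x])
        (fun y hy => by
          rcases List.mem_append.1 hy with h | h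
          · exact List.mem_append_left _ (h1 y h)
          · exact List.mem_append_right _ h)
        (fun s hsm => by
          rcases List.mem_append.1 hsm with h | h
          · obtain ⟨y, hy, hsy⟩ := h2 s h
            exact ⟨y, List.mem_append_left _ hy, hsy⟩
          · have hsx : s = x := List.mem_singleton.1 h
            exact ⟨x, List.mem_append_right _ (List.mem_singleton.2 rfl),
              by rw [hsx]; exact subL_refl x⟩)]
      simp

-- the predecessor filter is exactly B's enumerate/slice comprehension
theorem pf_eq_filterMap (l seen : List (List String)) :
    pf seen l = (PySem.List.enumerate l (seen.length : Int)).filterMap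
      (fun p => if (PySem.List.slice (seen ++ l) none (some p.1)).any
                    (fun prev => subL p.2 prev)
                then none else some p.2) := by
  induction l generalizing seen with
  | nil => simp [pf, PySem.List.enumerate]
  | cons x xs ih =>
    rw [PySem.List.enumerate_cons, List.filterMap_cons]
    have hslice : PySem.List.slice (seen ++ x :: xs) none (some (seen.length : Int)) = seen := by
      rw [PySem.List.slice_to_natCast, List.take_left]
    have harr : seen ++ x :: xs = (seen ++ [x]) ++ xs := by simp
    have hidx : (seen.length : Int) + 1 = ((seen ++ [x]).length : Int) := by
      simp [List.length_append]
    simp only [hslice]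
    by_cases h : seen.any (fun s => subL x s) = true
    · simp only [pf, h, if_true]
      rw [ih (seen ++ [x]), hidx, harr]
    · simp only [pf, h, Bool.false_eq_true, if_false]
      rw [ih (seen ++ [x]), hidx, harr]

-- ===== VERDICT (by name: the statement is the Claim_ definition above) =====
theorem get_items_to_keep_py_spec : Claim_equal_get_items_to_keep_py := by
  intro batch_list _
  show get_items_to_keep_py batch_list = get_items_to_keep_py_alt batch_list
  unfold get_items_to_keep_py get_items_to_keep_py_alt
  rw [show (fun q : Int × List String => processLabelsPy q.2)
        = processLabelsPy ∘ (fun q : Int × List String => q.2) from rfl,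
    ← List.map_map]
  congr 1
  rw [map_snd_greedy, map_snd_sorted_enum]
  have h := greedy_eq_pf (PySem.List.sorted batch_list (fun l => PySem.List.len l) true) [] []
    (by simp) (by simp)
  simp only [List.map_nil]
  rw [h, List.nil_append, pf_eq_filterMap]
  norm_num
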